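-- pv_equiv track=rewrite | github.com/AlanKhan145/calm- | src/calm/tools/copernicus.py | _extract_available_vars_from_timeseries
-- ===== SOURCE A (Python) =====
-- from typing import Any, Dict, List, Optional, Tuple
--
-- def _extract_available_vars_from_timeseries(timeseries: List[Dict[str, Any]]) -> List[str]:
--     available = set()
--     for row in timeseries:
--         if row.get("temperature") is not None:
--             available.add("2m_temperature")
--         if row.get("humidity") is not None:
--             available.add("relative_humidity_2m")
--         if row.get("precipitation") is not None:
--             available.add("total_precipitation")
--         if row.get("wind_speed") is not None:
--             available.add("10m_wind_speed")
--         if row.get("u_wind") is not None: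
--             available.add("10m_u_component_of_wind")
--         if row.get("v_wind") is not None:
--             available.add("10m_v_component_of_wind")
--     return sorted(available)
-- ===== SOURCE B (Python) =====
-- from typing import Any, Dict, List, Optional, Tuple
--
-- # (source key, output variable name), pre-sorted by output name so no sort call is needed
-- _VAR_TABLE = [
--     ("u_wind", "10m_u_component_of_wind"),
--     ("v_wind", "10m_v_component_of_wind"),
--     ("wind_speed", "10m_wind_speed"),
--     ("temperature", "2m_temperature"),
--     ("humidity", "relative_humidity_2m"),
--     ("precipitation", "total_precipitation"),
-- ]
--
-- def _extract_available_vars_from_timeseries(timeseries: List[Dict[str, Any]]) -> List[str]: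
--     return [name for key, name in _VAR_TABLE
--             if any(row.get(key) is not None for row in timeseries)]
-- ===== Notes on version B (the rewrite author's own statement) =====
-- stated objective: idiomatic
-- what changed: Replaced the row-major loop with six hardcoded if/add branches and a final sort by a table-driven column-wise comprehension: for each (key, name) of a name-sorted mapping, include name iff any(row.get(key) is not None), so no set and no sort call are needed.
import Mathlib
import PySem

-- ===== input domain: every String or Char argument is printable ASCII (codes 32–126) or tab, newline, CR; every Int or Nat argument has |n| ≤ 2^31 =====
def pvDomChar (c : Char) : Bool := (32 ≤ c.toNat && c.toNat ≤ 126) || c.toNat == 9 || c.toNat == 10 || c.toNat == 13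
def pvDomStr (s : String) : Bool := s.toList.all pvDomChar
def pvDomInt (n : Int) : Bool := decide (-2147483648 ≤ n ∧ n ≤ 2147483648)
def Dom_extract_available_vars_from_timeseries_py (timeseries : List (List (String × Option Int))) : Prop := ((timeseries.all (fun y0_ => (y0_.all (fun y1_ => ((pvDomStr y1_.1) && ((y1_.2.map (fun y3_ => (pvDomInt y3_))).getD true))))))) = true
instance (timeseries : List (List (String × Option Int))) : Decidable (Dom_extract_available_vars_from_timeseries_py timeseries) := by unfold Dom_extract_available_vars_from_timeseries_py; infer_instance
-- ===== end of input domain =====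

-- B replaces A's row-major loop (six hardcoded branches into a set, then sorted) by a
-- table-driven column-wise scan over a name-sorted mapping; objective: idiomatic.

-- ===== PORT A =====
-- one loop over rows, six conditional set-inserts, then sorted(available)
def extract_available_vars_from_timeseries_py (timeseries : List (List (String × Option Int))) : List String :=
  let available : PySem.Set String :=
    timeseries.foldl (fun s row =>
      let d := PySem.Dict.mk row
      let s := if ((d.getD "temperature" none).isSome) then PySem.Set.add s "2m_temperature" else s
      let s := if ((d.getD "humidity" none).isSome) then PySem.Set.add s "relative_humidity_2m" else s
      let s := if ((d.getD "precipitation" none).isSome) then PySem.Set.add s "total_precipitation" else s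
      let s := if ((d.getD "wind_speed" none).isSome) then PySem.Set.add s "10m_wind_speed" else s
      let s := if ((d.getD "u_wind" none).isSome) then PySem.Set.add s "10m_u_component_of_wind" else s
      let s := if ((d.getD "v_wind" none).isSome) then PySem.Set.add s "10m_v_component_of_wind" else s
      s) PySem.Set.empty
  PySem.List.sorted available (fun x => x) false

-- ===== PORT B =====
-- the (key, name) table, pre-sorted by name
def pvVarTable : List (String × String) :=
  [("u_wind", "10m_u_component_of_wind"),
   ("v_wind", "10m_v_component_of_wind"),
   ("wind_speed", "10m_wind_speed"),
   ("temperature", "2m_temperature"),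
   ("humidity", "relative_humidity_2m"),
   ("precipitation", "total_precipitation")]

-- column-wise: [name for key, name in table if any(row.get(key) is not None for row in timeseries)]
def extract_available_vars_from_timeseries_py_alt (timeseries : List (List (String × Option Int))) : List String :=
  (pvVarTable.filter (fun kv =>
      timeseries.any (fun row => ((PySem.Dict.mk row).getD kv.1 none).isSome))).map (fun kv => kv.2)

-- ===== PRECONDITION & SPEC =====
def Spec_extract_available_vars_from_timeseries_py (timeseries : List (List (String × Option Int))) (out : List String) : Prop := out = extract_available_vars_from_timeseries_py_alt timeseries
instance (timeseries : List (List (String × Option Int))) (out : List String) : Decidable (Spec_extract_available_vars_from_timeseries_py timeseries out) := by unfold Spec_extract_available_vars_from_timeseries_py; infer_instance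

-- ===== CLAIM (what is proved, stated in full; the proofs are below) =====
def Claim_equal_extract_available_vars_from_timeseries_py : Prop := ∀ (timeseries : List (List (String × Option Int))), Dom_extract_available_vars_from_timeseries_py timeseries → Spec_extract_available_vars_from_timeseries_py timeseries (extract_available_vars_from_timeseries_py timeseries)

-- ===== LEMMAS AND PROOFS =====

-- "variable name is available in column k", the per-column test B performs
def pvHas (timeseries : List (List (String × Option Int))) (k : String) : Bool :=
  timeseries.any (fun row => ((PySem.Dict.mk row).getD k none).isSome)

-- A's loop body
def pvStep (s : PySem.Set String) (row : List (String × Option Int)) : PySem.Set String :=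
  let d := PySem.Dict.mk row
  let s := if ((d.getD "temperature" none).isSome) then PySem.Set.add s "2m_temperature" else s
  let s := if ((d.getD "humidity" none).isSome) then PySem.Set.add s "relative_humidity_2m" else s
  let s := if ((d.getD "precipitation" none).isSome) then PySem.Set.add s "total_precipitation" else s
  let s := if ((d.getD "wind_speed" none).isSome) then PySem.Set.add s "10m_wind_speed" else s
  let s := if ((d.getD "u_wind" none).isSome) then PySem.Set.add s "10m_u_component_of_wind" else s
  let s := if ((d.getD "v_wind" none).isSome) then PySem.Set.add s "10m_v_component_of_wind" else s
  s

lemma mem_ite_add (s : PySem.Set String) (c : Bool) (n x : String) :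
    (x ∈ if c = true then PySem.Set.add s n else s) ↔ x ∈ s ∨ (x = n ∧ c = true) := by
  cases c <;> simp [PySem.Set.mem_add]

lemma nodup_ite_add (s : PySem.Set String) (c : Bool) (n : String) (h : s.Nodup) :
    (if c = true then PySem.Set.add s n else s).Nodup := by
  cases c <;> simp [h, PySem.Set.nodup_add]

lemma mem_pvStep (s : PySem.Set String) (row : List (String × Option Int)) (x : String) :
    x ∈ pvStep s row ↔ x ∈ s ∨ ∃ kv ∈ pvVarTable,
      x = kv.2 ∧ ((PySem.Dict.mk row).getD kv.1 none).isSome := by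
  simp only [pvStep, mem_ite_add, pvVarTable]
  simp only [List.mem_cons, List.not_mem_nil, or_false, exists_eq_or_imp, exists_eq_left]
  tauto

lemma nodup_pvStep (s : PySem.Set String) (row : List (String × Option Int)) (h : s.Nodup) :
    (pvStep s row).Nodup := by
  simp only [pvStep]
  exact nodup_ite_add _ _ _ (nodup_ite_add _ _ _ (nodup_ite_add _ _ _ (nodup_ite_add _ _ _ (nodup_ite_add _ _ _ (nodup_ite_add _ _ _ h)))))

lemma mem_foldl_pvStep (ts : List (List (String × Option Int))) (s : PySem.Set String) (x : String) :
    x ∈ ts.foldl pvStep s ↔ x ∈ s ∨ ∃ kv ∈ pvVarTable, x = kv.2 ∧ pvHas ts kv.1 := by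
  induction ts generalizing s with
  | nil => simp [pvHas]
  | cons row rest ih =>
      simp only [List.foldl_cons, ih, mem_pvStep, pvHas, List.any_cons]
      constructor
      · rintro ((hs | ⟨kv, hkv, hx, hp⟩) | ⟨kv, hkv, hx, hp⟩)
        · exact Or.inl hs
        · exact Or.inr ⟨kv, hkv, hx, by simp [hp]⟩
        · exact Or.inr ⟨kv, hkv, hx, by simp at hp ⊢; exact Or.inr hp⟩
      · rintro (hs | ⟨kv, hkv, hx, hp⟩)
        · exact Or.inl (Or.inl hs)
        · rcases (by simpa [pvHas] using hp : _ ∨ _) with h1 | h2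
          · exact Or.inl (Or.inr ⟨kv, hkv, hx, h1⟩)
          · exact Or.inr ⟨kv, hkv, hx, by simpa [pvHas] using h2⟩

lemma nodup_foldl_pvStep (ts : List (List (String × Option Int))) (s : PySem.Set String)
    (h : s.Nodup) : (ts.foldl pvStep s).Nodup := by
  induction ts generalizing s with
  | nil => exact h
  | cons row rest ih => exact ih _ (nodup_pvStep _ _ h)

-- B's output is a sublist of the table's name column
lemma alt_sublist (ts : List (List (String × Option Int))) :
    (extract_available_vars_from_timeseries_py_alt ts).Sublist (pvVarTable.map (fun kv => kv.2)) := by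
  exact List.Sublist.map _ List.filter_sublist


lemma names_pairwise_lt : (pvVarTable.map (fun kv => kv.2)).Pairwise (· < ·) := by
  simp only [pvVarTable, List.map_cons, List.map_nil, List.pairwise_cons, List.mem_cons,
    List.not_mem_nil, or_false, List.Pairwise.nil]
  refine ?_
  simp only [String.lt_iff_toList_lt]
  norm_num
  decide

lemma alt_pairwise (ts : List (List (String × Option Int))) :
    (extract_available_vars_from_timeseries_py_alt ts).Pairwise (· < ·) :=
  List.Pairwise.sublist (alt_sublist ts) names_pairwise_lt

lemma alt_nodup (ts : List (List (String × Option Int))) :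
    (extract_available_vars_from_timeseries_py_alt ts).Nodup :=
  (alt_pairwise ts).imp (fun h => ne_of_lt h)

lemma mem_alt (ts : List (List (String × Option Int))) (x : String) :
    x ∈ extract_available_vars_from_timeseries_py_alt ts ↔
      ∃ kv ∈ pvVarTable, x = kv.2 ∧ pvHas ts kv.1 := by
  simp only [extract_available_vars_from_timeseries_py_alt, List.mem_map, List.mem_filter, pvHas]
  constructor
  · rintro ⟨kv, ⟨hm, hp⟩, rfl⟩; exact ⟨kv, hm, rfl, hp⟩
  · rintro ⟨kv, hm, rfl, hp⟩; exact ⟨kv, ⟨hm, hp⟩, rfl⟩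

-- ===== VERDICT (by name: the statement is the Claim_ definition above) =====
theorem extract_available_vars_from_timeseries_py_spec : Claim_equal_extract_available_vars_from_timeseries_py := by
  intro ts _
  unfold Spec_extract_available_vars_from_timeseries_py
  show PySem.List.sorted (ts.foldl pvStep PySem.Set.empty) (fun x => x) false = _
  apply PySem.List.sorted_eq_of_perm_of_pairwise_lt
  · rw [List.perm_ext_iff_of_nodup (alt_nodup ts) (nodup_foldl_pvStep ts _ (by simp [PySem.Set.empty]))]
    intro x
    rw [mem_alt, mem_foldl_pvStep]
    simp [PySem.Set.empty]
  · exact alt_pairwise ts
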